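-- pv_equiv track=rewrite | github.com/TERADA-DANTE/algorithm | python/acmicpc/solved/_2981.py | solution
-- ===== SOURCE A (Python) =====
-- def solution(candidates, numbers):
--     answer = []
--     for candidate in candidates:
--         check = set()
--         for number in numbers:
--             check.add(number % candidate)
--             if len(check) > 1:
--                 break
--         else:
--             answer.append(candidate)
--
--     return answer
-- ===== SOURCE B (Python) =====
-- def _gcd(a, b):
--     return a if b == 0 else _gcd(b, a % b)
--
--
-- def solution(candidates, numbers):
--     # All numbers leave the same remainder mod c  iff  c divides every
--     # pairwise difference, i.e. c divides the gcd of (n - numbers[0]).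
--     if not numbers:
--         return list(candidates)
--     base = numbers[0]
--     g = 0
--     for n in numbers:
--         g = _gcd(g, abs(n - base))
--     return [c for c in candidates if g % c == 0]
-- ===== Notes on version B (the rewrite author's own statement) =====
-- stated objective: faster
-- what changed: Instead of testing each candidate against every number (inner remainder-set loop), B computes the gcd of the differences (n - numbers[0]) once and keeps a candidate iff it divides that gcd.
import Mathlib
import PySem

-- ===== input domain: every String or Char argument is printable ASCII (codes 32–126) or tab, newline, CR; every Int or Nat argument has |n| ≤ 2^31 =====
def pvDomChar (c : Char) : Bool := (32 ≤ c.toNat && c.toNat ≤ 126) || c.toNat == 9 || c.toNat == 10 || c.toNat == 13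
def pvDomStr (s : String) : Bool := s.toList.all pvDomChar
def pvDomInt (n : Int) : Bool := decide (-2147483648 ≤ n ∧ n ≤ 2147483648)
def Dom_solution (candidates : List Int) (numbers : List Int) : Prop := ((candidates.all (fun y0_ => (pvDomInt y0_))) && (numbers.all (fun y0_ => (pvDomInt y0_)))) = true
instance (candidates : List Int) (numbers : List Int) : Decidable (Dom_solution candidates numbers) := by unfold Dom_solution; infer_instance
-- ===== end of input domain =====

-- B replaces A's per-candidate scan of all numbers by one gcd of differences, then a
-- single divisibility test per candidate (objective: faster, asymptotically).

-- ===== PORT A =====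
-- inner 'for number in numbers: check.add(number % candidate); if len(check) > 1: break / else:'
-- returns true iff the loop runs to completion (the for-else fires)
def checkLoop (c : Int) : List Int → PySem.Set Int → Bool
  | [], _ => true
  | n :: ns, s =>
      let s' := PySem.Set.add s (PySem.Int.mod n c)
      if 1 < s'.length then false else checkLoop c ns s'

def solution (candidates : List Int) (numbers : List Int) : List Int :=
  candidates.foldl
    (fun answer candidate =>
      if checkLoop candidate numbers PySem.Set.empty then answer ++ [candidate] else answer)
    []

-- ===== PORT B =====
-- recursive Euclid of Source B (Python '%' = PySem.Int.mod)
def gcdI (a b : Int) : Int :=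
  if b = 0 then a else gcdI b (PySem.Int.mod a b)
termination_by b.natAbs
decreasing_by
  rename_i h
  rcases lt_or_gt_of_ne h with hb | hb
  · have h1 := (PySem.Int.mod_neg_bounds a hb).1
    have h2 := (PySem.Int.mod_neg_bounds a hb).2
    omega
  · have h1 := PySem.Int.mod_nonneg a hb
    have h2 := PySem.Int.mod_lt a hb
    omega

def solution_alt (candidates : List Int) (numbers : List Int) : List Int :=
  match numbers with
  | [] => candidates
  | base :: _ =>
      let g := numbers.foldl (fun g n => gcdI g |n - base|) 0
      candidates.filter (fun c => PySem.Int.mod g c == 0)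

-- ===== PRECONDITION & SPEC =====
-- Pre_ excludes exactly the inputs where A raises ZeroDivisionError (candidate 0 used
-- as a divisor, i.e. 0 ∈ candidates with numbers nonempty); B raises there too.
def Pre_solution (candidates : List Int) (numbers : List Int) : Prop :=
  (0 : Int) ∈ candidates → numbers = []
instance (candidates : List Int) (numbers : List Int) : Decidable (Pre_solution candidates numbers) := by unfold Pre_solution; infer_instance

def pvWitness_solution : List Int × List Int := ([3, -3, 7, 2], [1, 7, 13])

def Spec_solution (candidates : List Int) (numbers : List Int) (out : List Int) : Prop := out = solution_alt candidates numbers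
instance (candidates : List Int) (numbers : List Int) (out : List Int) : Decidable (Spec_solution candidates numbers out) := by unfold Spec_solution; infer_instance

-- ===== CLAIM (what is proved, stated in full; the proofs are below) =====
def Claim_equal_solution : Prop := ∀ (candidates : List Int) (numbers : List Int), Dom_solution candidates numbers → Pre_solution candidates numbers → Spec_solution candidates numbers (solution candidates numbers)

-- ===== LEMMAS AND PROOFS =====

-- c divides gcdI a b iff it divides both arguments
theorem gcdI_dvd_iff (c a b : Int) : c ∣ gcdI a b ↔ c ∣ a ∧ c ∣ b := by
  induction a, b using gcdI.induct with
  | case1 a => simp [gcdI]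
  | case2 a b hb ih =>
      rw [gcdI, if_neg hb, ih]
      have hmod : PySem.Int.mod a b = a - PySem.Int.floordiv a b * b := by
        have := PySem.Int.floordiv_mul_add_mod a b; linarith
      constructor
      · rintro ⟨h1, h2⟩
        refine ⟨?_, h1⟩
        have : a = PySem.Int.mod a b + PySem.Int.floordiv a b * b := by rw [hmod]; ring
        rw [this]; exact dvd_add h2 (Dvd.dvd.mul_left h1 _)
      · rintro ⟨h1, h2⟩
        exact ⟨h2, by rw [hmod]; exact dvd_sub h1 (Dvd.dvd.mul_left h2 _)⟩

theorem fold_dvd (c base : Int) (l : List Int) (g0 : Int) :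
    c ∣ l.foldl (fun g n => gcdI g |n - base|) g0 ↔ c ∣ g0 ∧ ∀ n ∈ l, c ∣ (n - base) := by
  induction l generalizing g0 with
  | nil => simp
  | cons x xs ih =>
      simp only [List.foldl_cons, ih, gcdI_dvd_iff, dvd_abs, List.mem_cons]
      constructor
      · rintro ⟨⟨h1, h2⟩, h3⟩
        exact ⟨h1, by rintro n (rfl | hn); exacts [h2, h3 n hn]⟩
      · rintro ⟨h1, h2⟩
        exact ⟨⟨h1, h2 x (Or.inl rfl)⟩, fun n hn => h2 n (Or.inr hn)⟩

-- Python remainders mod c are equal iff c divides the difference (every c, incl. 0)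
theorem mod_sub_mod_dvd (c n m : Int) :
    c ∣ (n - m) - (PySem.Int.mod n c - PySem.Int.mod m c) := by
  have hn := PySem.Int.floordiv_mul_add_mod n c
  have hm := PySem.Int.floordiv_mul_add_mod m c
  have key : (n - m) - (PySem.Int.mod n c - PySem.Int.mod m c)
      = (PySem.Int.floordiv n c - PySem.Int.floordiv m c) * c := by linear_combination hm - hn
  rw [key]; exact Dvd.intro_left _ rfl

theorem mod_eq_mod_iff (c n m : Int) :
    PySem.Int.mod n c = PySem.Int.mod m c ↔ c ∣ (n - m) := by
  constructor
  · intro h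
    have h2 := mod_sub_mod_dvd c n m
    rw [h, sub_self, sub_zero] at h2
    exact h2
  · intro h
    have hdvd : c ∣ PySem.Int.mod n c - PySem.Int.mod m c := by
      simpa using dvd_sub h (mod_sub_mod_dvd c n m)
    rcases eq_or_ne c 0 with rfl | hc
    · have hn := PySem.Int.floordiv_mul_add_mod n 0
      have hm := PySem.Int.floordiv_mul_add_mod m 0
      simp only [mul_zero, zero_add] at hn hm
      omega
    · have habs : |PySem.Int.mod n c - PySem.Int.mod m c| < |c| := by
        rcases lt_or_gt_of_ne hc with hneg | hpos
        · have b1 := PySem.Int.mod_neg_bounds n hneg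
          have b2 := PySem.Int.mod_neg_bounds m hneg
          rw [abs_of_neg hneg]
          rcases abs_cases (PySem.Int.mod n c - PySem.Int.mod m c) with ⟨he, _⟩ | ⟨he, _⟩ <;> omega
        · have b1 := PySem.Int.mod_nonneg n hpos
          have b2 := PySem.Int.mod_lt n hpos
          have b3 := PySem.Int.mod_nonneg m hpos
          have b4 := PySem.Int.mod_lt m hpos
          rw [abs_of_pos hpos]
          rcases abs_cases (PySem.Int.mod n c - PySem.Int.mod m c) with ⟨he, _⟩ | ⟨he, _⟩ <;> omega
      have hd0 : PySem.Int.mod n c - PySem.Int.mod m c = 0 := by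
        by_contra hne
        have : |c| ≤ |PySem.Int.mod n c - PySem.Int.mod m c| :=
          Int.le_of_dvd (abs_pos.mpr hne) ((abs_dvd _ _).mpr ((dvd_abs _ _).mpr hdvd))
        omega
      omega

-- the inner loop from a one-element set succeeds iff every remainder equals r
theorem checkLoop_inv (c : Int) (l : List Int) (r : Int) :
    checkLoop c l [r] = true ↔ ∀ n ∈ l, PySem.Int.mod n c = r := by
  induction l with
  | nil => simp [checkLoop]
  | cons x xs ih =>
      by_cases hx : PySem.Int.mod x c = r
      · simp [checkLoop, PySem.Set.add, PySem.Set.contains, hx, ih]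
      · simp [checkLoop, PySem.Set.add, PySem.Set.contains, hx]

theorem checkLoop_cons (c base : Int) (rest : List Int) :
    checkLoop c (base :: rest) PySem.Set.empty = true ↔
      ∀ n ∈ rest, PySem.Int.mod n c = PySem.Int.mod base c := by
  simp [checkLoop, PySem.Set.empty, PySem.Set.add, PySem.Set.contains, checkLoop_inv]

-- pointwise agreement of A's test with B's test (every candidate c, incl. 0)
theorem test_eq (c base : Int) (rest : List Int) :
    checkLoop c (base :: rest) PySem.Set.empty =
      (PySem.Int.mod ((base :: rest).foldl (fun g n => gcdI g |n - base|) 0) c == 0) := by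
  have : checkLoop c (base :: rest) PySem.Set.empty = true ↔
      (PySem.Int.mod ((base :: rest).foldl (fun g n => gcdI g |n - base|) 0) c == 0) = true := by
    rw [checkLoop_cons, beq_iff_eq, PySem.Int.mod_eq_zero_iff_dvd, fold_dvd]
    simp only [dvd_zero, true_and, List.mem_cons]
    constructor
    · intro h
      rintro n (rfl | hn)
      · simp
      · exact (mod_eq_mod_iff c n base).mp (h n hn)
    · intro h n hn
      exact (mod_eq_mod_iff c n base).mpr (h n (Or.inr hn))
  rcases Bool.eq_false_or_eq_true (checkLoop c (base :: rest) PySem.Set.empty) with h | h <;>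
    rcases Bool.eq_false_or_eq_true
      (PySem.Int.mod ((base :: rest).foldl (fun g n => gcdI g |n - base|) 0) c == 0) with h' | h' <;>
    simp_all

-- ===== VERDICT (by name: the statement is the Claim_ definition above) =====
theorem solution_spec : Claim_equal_solution := by
  intro candidates numbers _ _
  unfold Spec_solution solution solution_alt
  match numbers with
  | [] =>
      simp only
      rw [PySem.List.foldl_append_if_eq_filter]
      simp [checkLoop]
  | base :: rest =>
      simp only
      rw [PySem.List.foldl_congr_mem
        (g := fun answer candidate =>
          if (PySem.Int.mod ((base :: rest).foldl (fun g n => gcdI g |n - base|) 0) candidate == 0)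
          then answer ++ [candidate] else answer)]
      · rw [PySem.List.foldl_append_if_eq_filter]
        simp
      · intro acc x _
        rw [test_eq]
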